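-- pv_equiv track=rewrite | github.com/totobusnello/Toto-Code | oaustegard-skills/remembering/cache.py | _escape_fts5_query
-- ===== SOURCE A (Python) =====
-- def _escape_fts5_query(query: str) -> str:
--     """Escape special FTS5 characters and format for search.
--
--     FTS5 special chars: " * ( ) : ^
--     We escape them and add prefix matching (*) for better UX.
--     """
--     # Remove FTS5 special characters that could break the query
--     special_chars = '"*():^'
--     escaped = query
--     for char in special_chars:
--         escaped = escaped.replace(char, ' ')
--
--     # Split into words, filter empty, and add prefix matching
--     words = [w.strip() for w in escaped.split() if w.strip()]
--     if not words:
--         return '""'  # Empty query - match nothing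
--
--     # Use OR between words with prefix matching for partial matches
--     return ' OR '.join(f'"{w}"*' for w in words)
-- ===== SOURCE B (Python) =====
-- def _escape_fts5_query(query: str) -> str:
--     """Single-pass tokenizer: split on FTS5 special chars and whitespace in one scan."""
--     words = []
--     buf = []
--     for ch in query:
--         if ch in '"*():^' or ch.isspace():
--             if buf:
--                 words.append(''.join(buf))
--                 buf = []
--         else:
--             buf.append(ch)
--     if buf:
--         words.append(''.join(buf))
--     if not words:
--         return '""'
--     return ' OR '.join(f'"{w}"*' for w in words)
-- ===== Notes on version B (the rewrite author's own statement) =====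
-- stated objective: alternative
-- what changed: Replaced six full replace-scans plus a split pass and per-word strip with a single-pass tokenizer that builds the word list directly in one scan over the query; it trades A's multiple C-level string passes for one explicit scan.
import Mathlib
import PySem

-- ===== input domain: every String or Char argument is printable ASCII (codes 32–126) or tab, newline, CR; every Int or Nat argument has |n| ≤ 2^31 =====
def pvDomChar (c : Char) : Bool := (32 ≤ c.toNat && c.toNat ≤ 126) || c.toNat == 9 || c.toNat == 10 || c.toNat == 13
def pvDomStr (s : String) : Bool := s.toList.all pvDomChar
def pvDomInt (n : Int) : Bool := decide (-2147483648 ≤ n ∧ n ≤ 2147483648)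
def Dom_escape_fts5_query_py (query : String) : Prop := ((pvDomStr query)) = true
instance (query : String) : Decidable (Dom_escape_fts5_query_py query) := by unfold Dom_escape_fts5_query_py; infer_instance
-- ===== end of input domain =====

-- B replaces A's six replace-scans + split + per-word strip with one single-pass tokenizer (alternative decomposition, same results).


-- ===== PORT A =====
-- special_chars = '"*():^'
def pvSpecialsA : List Char := ['"', '*', '(', ')', ':', '^']

-- wrapper for f'"{w}"*'
def pvWrap (w : List Char) : List Char := '"' :: w ++ ['"', '*']

def escape_fts5_query_py (query : String) : String :=
  -- for char in special_chars: escaped = escaped.replace(char, ' ')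
  let escaped : List Char :=
    pvSpecialsA.foldl (fun acc ch => PySem.Chars.replace acc [ch] [' ']) query.toList
  -- words = [w.strip() for w in escaped.split() if w.strip()]
  let words : List (List Char) :=
    (PySem.Chars.split₀ escaped).filterMap
      (fun w => if (PySem.Chars.strip w).isEmpty then none else some (PySem.Chars.strip w))
  if words.isEmpty then "\"\""
  else String.ofList (PySem.Chars.join " OR ".toList (words.map pvWrap))

-- ===== PORT B =====
-- ch in '"*():^' or ch.isspace()
def pvSepB (c : Char) : Bool := pvSpecialsA.contains c || PySem.Chars.isspace c

-- one loop step: flush the buffer on a separator, else append the char (single scan)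
def pvStepB (p : List (List Char) × List Char) (c : Char) : List (List Char) × List Char :=
  if pvSepB c then (if p.2.isEmpty then p else (p.1 ++ [p.2], [])) else (p.1, p.2 ++ [c])

def escape_fts5_query_py_alt (query : String) : String :=
  let st := query.toList.foldl pvStepB ([], [])
  let words := if st.2.isEmpty then st.1 else st.1 ++ [st.2]
  if words.isEmpty then "\"\""
  else String.ofList (PySem.Chars.join " OR ".toList (words.map pvWrap))

-- ===== PRECONDITION & SPEC =====
def Spec_escape_fts5_query_py (query : String) (out : String) : Prop := out = escape_fts5_query_py_alt query
instance (query : String) (out : String) : Decidable (Spec_escape_fts5_query_py query out) := by unfold Spec_escape_fts5_query_py; infer_instance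

-- ===== CLAIM (what is proved, stated in full; the proofs are below) =====
def Claim_equal_escape_fts5_query_py : Prop := ∀ (query : String), Dom_escape_fts5_query_py query → Spec_escape_fts5_query_py query (escape_fts5_query_py query)

-- ===== LEMMAS AND PROOFS =====

-- the character map the six sequential replaces amount to
def pvRepl (c : Char) : Char := if pvSpecialsA.contains c then ' ' else c

-- finish of B's fold state
def pvFinish (p : List (List Char) × List Char) : List (List Char) :=
  p.1 ++ (if p.2.isEmpty then [] else [p.2])

theorem pvReplaceGo_single (c d : Char) :
    ∀ (n : Nat) (l acc : List Char), l.length ≤ n →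
      PySem.Chars.replace.go [c] [d] n l acc
        = acc.reverse ++ l.map (fun x => if x = c then d else x) := by
  intro n
  induction n with
  | zero => intro l acc h; cases l with
    | nil => simp [PySem.Chars.replace.go]
    | cons a t => simp at h
  | succ n ih =>
    intro l acc h
    cases l with
    | nil => simp [PySem.Chars.replace.go]
    | cons a t =>
      simp only [PySem.Chars.replace.go]
      by_cases hc : a = c
      · subst hc
        rw [if_pos (by simp [List.isPrefixOf])]
        have hdrop : List.drop [a].length (a :: t) = t := by simp
        rw [hdrop]
        rw [show (([d] : List Char).reverse ++ acc) = d :: acc by simp,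
          ih t (d :: acc) (by simpa using Nat.le_of_succ_le_succ h)]
        simp
      · rw [if_neg (by simp [List.isPrefixOf]; exact fun h' => hc h'.symm)]
        rw [ih t (a :: acc) (by simpa using Nat.le_of_succ_le_succ h)]
        simp [hc]

theorem pvReplace_single (c d : Char) (cs : List Char) :
    PySem.Chars.replace cs [c] [d] = cs.map (fun x => if x = c then d else x) := by
  simp [PySem.Chars.replace]
  exact pvReplaceGo_single c d cs.length cs [] (le_refl _)

-- the six replaces compose to one map with pvRepl
theorem pvEscaped_eq_map (cs : List Char) :
    pvSpecialsA.foldl (fun acc ch => PySem.Chars.replace acc [ch] [' ']) cs = cs.map pvRepl := by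
  simp only [pvSpecialsA, List.foldl_cons, List.foldl_nil, pvReplace_single, List.map_map]
  apply List.map_congr_left
  intro x _
  simp only [Function.comp, pvRepl, pvSpecialsA]
  by_cases h1 : x = '"' <;> by_cases h2 : x = '*' <;> by_cases h3 : x = '(' <;>
    by_cases h4 : x = ')' <;> by_cases h5 : x = ':' <;> by_cases h6 : x = '^' <;>
    simp_all

theorem pvIsspace_repl (c : Char) : PySem.Chars.isspace (pvRepl c) = pvSepB c := by
  unfold pvRepl pvSepB
  by_cases h : pvSpecialsA.contains c = true
  · rw [if_pos h, h, Bool.true_or]; decide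
  · simp only [Bool.not_eq_true] at h
    rw [if_neg (by simpa using h), h, Bool.false_or]

theorem pvRepl_of_not_sep (c : Char) (h : pvSepB c = false) : pvRepl c = c := by
  unfold pvSepB at h
  simp only [Bool.or_eq_false_iff] at h
  unfold pvRepl
  rw [if_neg (by simpa using h.1)]

-- B's fold accumulates its word list by appending
theorem pvFoldl_ws (cs : List Char) :
    ∀ (ws : List (List Char)) (cur : List Char),
      cs.foldl pvStepB (ws, cur)
        = (ws ++ (cs.foldl pvStepB ([], cur)).1, (cs.foldl pvStepB ([], cur)).2) := by
  induction cs with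
  | nil => intro ws cur; simp
  | cons c t ih =>
    intro ws cur
    simp only [List.foldl_cons]
    by_cases hs : pvSepB c
    · by_cases he : cur.isEmpty
      · simp only [pvStepB, hs, if_pos, he]
        exact ih ws cur
      · simp only [pvStepB, hs, if_true, he, if_false, Bool.false_eq_true, List.nil_append]
        rw [ih (ws ++ [cur]) [], ih [cur] []]
        simp
    · simp only [pvStepB, hs, Bool.false_eq_true, if_false]
      exact ih ws (cur ++ [c])

-- the split of the mapped string equals B's single-pass fold
theorem pvGo_eq_fold (cs : List Char) :
    ∀ (cur : List Char) (acc : List (List Char)),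
      PySem.Chars.split₀.go (cs.map pvRepl) cur acc
        = acc.reverse ++ pvFinish (cs.foldl pvStepB ([], cur.reverse)) := by
  induction cs with
  | nil =>
    intro cur acc
    by_cases he : cur.isEmpty
    · have : cur = [] := by simpa [List.isEmpty_iff] using he
      subst this
      simp [PySem.Chars.split₀.go, pvFinish]
    · have hne : cur ≠ [] := by simpa [List.isEmpty_iff] using he
      simp [PySem.Chars.split₀.go, pvFinish, he]
  | cons c t ih =>
    intro cur acc
    simp only [List.map_cons, PySem.Chars.split₀.go, pvIsspace_repl]
    by_cases hs : pvSepB c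
    · simp only [hs, if_true, List.foldl_cons, pvStepB]
      by_cases he : cur.isEmpty
      · have : cur = [] := by simpa [List.isEmpty_iff] using he
        subst this
        simp only [List.isEmpty_nil, if_true]
        exact ih [] acc
      · have he' : cur.reverse.isEmpty = false := by
          simp [List.isEmpty_iff] at he ⊢; simpa using he
        simp only [he, Bool.false_eq_true, if_false, he']
        rw [ih [] (cur.reverse :: acc)]
        simp only [List.reverse_nil, List.nil_append]
        rw [pvFoldl_ws t [cur.reverse] []]
        simp [pvFinish]
    · simp only [hs, Bool.false_eq_true, if_false, List.foldl_cons, pvStepB]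
      rw [pvRepl_of_not_sep c (by simpa using hs), ih (c :: cur) acc]
      simp

-- every word produced by split₀ is nonempty and whitespace-free, so strip is the identity on it
theorem pvGo_words (cs : List Char) :
    ∀ (cur : List Char) (acc : List (List Char)),
      (∀ w ∈ acc, w ≠ [] ∧ ∀ c ∈ w, PySem.Chars.isspace c = false) →
      (∀ c ∈ cur, PySem.Chars.isspace c = false) →
      ∀ w ∈ PySem.Chars.split₀.go cs cur acc,
        w ≠ [] ∧ ∀ c ∈ w, PySem.Chars.isspace c = false := by
  induction cs with
  | nil =>
    intro cur acc hacc hcur w hw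
    by_cases he : cur.isEmpty
    · simp only [PySem.Chars.split₀.go, he, if_true, List.mem_reverse] at hw
      exact hacc w hw
    · have hne : cur ≠ [] := by simpa [List.isEmpty_iff] using he
      simp only [PySem.Chars.split₀.go, he, Bool.false_eq_true, if_false,
        List.reverse_cons, List.mem_append, List.mem_reverse, List.mem_singleton] at hw
      rcases hw with hw | hw
      · exact hacc w hw
      · subst hw
        refine ⟨by simpa using hne, ?_⟩
        intro c hc; exact hcur c (List.mem_reverse.mp hc)
  | cons c t ih =>
    intro cur acc hacc hcur w hw
    simp only [PySem.Chars.split₀.go] at hw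
    by_cases hs : PySem.Chars.isspace c
    · simp only [hs, if_true] at hw
      by_cases he : cur.isEmpty
      · rw [if_pos he] at hw
        exact ih [] acc hacc (by simp) w hw
      · rw [if_neg he] at hw
        refine ih [] (cur.reverse :: acc) ?_ (by simp) w hw
        intro v hv
        rcases List.mem_cons.mp hv with hv | hv
        · subst hv
          refine ⟨by simpa [List.isEmpty_iff] using he, ?_⟩
          intro d hd; exact hcur d (List.mem_reverse.mp hd)
        · exact hacc v hv
    · simp only [hs, Bool.false_eq_true, if_false] at hw
      refine ih (c :: cur) acc hacc ?_ w hw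
      intro d hd
      rcases List.mem_cons.mp hd with hd | hd
      · subst hd; simpa using hs
      · exact hcur d hd

theorem pvStrip_of_no_space (w : List Char)
    (h : ∀ c ∈ w, PySem.Chars.isspace c = false) : PySem.Chars.strip w = w := by
  unfold PySem.Chars.strip PySem.Chars.lstrip PySem.Chars.rstrip
  have h1 : List.dropWhile PySem.Chars.isspace w = w :=
    List.dropWhile_eq_self_iff.mpr (fun hl => by simpa using h _ (List.getElem_mem hl))
  have h2 : List.dropWhile PySem.Chars.isspace w.reverse = w.reverse :=
    List.dropWhile_eq_self_iff.mpr
      (fun hl => by simpa using h _ (List.mem_reverse.mp (List.getElem_mem hl)))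
  rw [h1, h2, List.reverse_reverse]

-- filterMap with the identity on every element is the identity
theorem pvFilterMap_id {α : Type} (f : α → Option α) :
    ∀ (l : List α), (∀ x ∈ l, f x = some x) → l.filterMap f = l := by
  intro l
  induction l with
  | nil => intro _; simp
  | cons a t ih =>
    intro h
    rw [List.filterMap_cons, h a (by simp), ih (fun x hx => h x (by simp [hx]))]

-- A's word list IS split₀ of the mapped string
theorem pvWordsA_eq (cs : List Char) :
    (PySem.Chars.split₀ (cs.map pvRepl)).filterMap
        (fun w => if (PySem.Chars.strip w).isEmpty then none else some (PySem.Chars.strip w))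
      = PySem.Chars.split₀ (cs.map pvRepl) := by
  apply pvFilterMap_id
  intro w hw
  obtain ⟨hne, hns⟩ := pvGo_words (cs.map pvRepl) [] [] (by simp) (by simp) w hw
  rw [pvStrip_of_no_space w hns]
  simp [List.isEmpty_iff, hne]

-- ===== VERDICT (by name: the statement is the Claim_ definition above) =====
theorem escape_fts5_query_py_spec : Claim_equal_escape_fts5_query_py := by
  intro query _
  unfold Spec_escape_fts5_query_py escape_fts5_query_py escape_fts5_query_py_alt
  dsimp only
  rw [pvEscaped_eq_map, pvWordsA_eq]
  unfold PySem.Chars.split₀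
  rw [pvGo_eq_fold query.toList [] []]
  simp only [List.reverse_nil, List.nil_append, pvFinish]
  rcases h : query.toList.foldl pvStepB ([], []) with ⟨ws, cur⟩
  by_cases hc : cur.isEmpty
  · simp [hc]
  · simp [hc]
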